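-- pv_equiv track=rewrite | github.com/Serius69/FIDEMPRO-LACTEOS | findempro/simulate/utils/variable_mapper.py | _get_variable_category
-- ===== SOURCE A (Python) =====
-- def _get_variable_category(variable_code: str) -> str:
--     """Determinar categoría de la variable"""
--
--     categories = {
--         'financial': ['PVP', 'CUIP', 'CFD', 'SE', 'GMM', 'CC', 'CTI', 'IIF'],
--         'operational': ['NEPP', 'MLP', 'TPE', 'CPPL', 'CPROD', 'ES', 'EE'],
--         'inventory': ['IPF', 'II', 'DPL', 'TR', 'CMIPF', 'MRE', 'MRA'],
--         'customer': ['CPD', 'VPC', 'PC', 'NC'],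
--         'logistics': ['CUTRANS', 'CTPLV', 'ALC', 'LG'],
--         'quality': ['QC', 'CCP'],
--         'resources': ['HAU', 'HTP', 'EAT', 'TTEP', 'TP'],
--         'components': ['CMP1', 'V1', 'CMP2', 'V2', 'CMP3', 'V3'],
--         'demand': ['DH']
--     }
--
--     for category, vars_in_cat in categories.items():
--         if variable_code in vars_in_cat:
--             return category
--
--     return 'other'
-- ===== SOURCE B (Python) =====
-- _CATEGORY_BY_CODE = {
--     'PVP': 'financial',
--     'CUIP': 'financial',
--     'CFD': 'financial',
--     'SE': 'financial',
--     'GMM': 'financial',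
--     'CC': 'financial',
--     'CTI': 'financial',
--     'IIF': 'financial',
--     'NEPP': 'operational',
--     'MLP': 'operational',
--     'TPE': 'operational',
--     'CPPL': 'operational',
--     'CPROD': 'operational',
--     'ES': 'operational',
--     'EE': 'operational',
--     'IPF': 'inventory',
--     'II': 'inventory',
--     'DPL': 'inventory',
--     'TR': 'inventory',
--     'CMIPF': 'inventory',
--     'MRE': 'inventory',
--     'MRA': 'inventory',
--     'CPD': 'customer',
--     'VPC': 'customer',
--     'PC': 'customer',
--     'NC': 'customer',
--     'CUTRANS': 'logistics',
--     'CTPLV': 'logistics',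
--     'ALC': 'logistics',
--     'LG': 'logistics',
--     'QC': 'quality',
--     'CCP': 'quality',
--     'HAU': 'resources',
--     'HTP': 'resources',
--     'EAT': 'resources',
--     'TTEP': 'resources',
--     'TP': 'resources',
--     'CMP1': 'components',
--     'V1': 'components',
--     'CMP2': 'components',
--     'V2': 'components',
--     'CMP3': 'components',
--     'V3': 'components',
--     'DH': 'demand',
-- }
--
--
-- def _get_variable_category(variable_code: str) -> str:
--     """Determinar categoría de la variable"""
--     return _CATEGORY_BY_CODE.get(variable_code, 'other')
-- ===== Notes on version B (the rewrite author's own statement) =====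
-- stated objective: idiomatic
-- what changed: Replaced the per-category loop with repeated membership scans by a precomputed flat code-to-category dict and a single .get lookup with the same default category.
import Mathlib
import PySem

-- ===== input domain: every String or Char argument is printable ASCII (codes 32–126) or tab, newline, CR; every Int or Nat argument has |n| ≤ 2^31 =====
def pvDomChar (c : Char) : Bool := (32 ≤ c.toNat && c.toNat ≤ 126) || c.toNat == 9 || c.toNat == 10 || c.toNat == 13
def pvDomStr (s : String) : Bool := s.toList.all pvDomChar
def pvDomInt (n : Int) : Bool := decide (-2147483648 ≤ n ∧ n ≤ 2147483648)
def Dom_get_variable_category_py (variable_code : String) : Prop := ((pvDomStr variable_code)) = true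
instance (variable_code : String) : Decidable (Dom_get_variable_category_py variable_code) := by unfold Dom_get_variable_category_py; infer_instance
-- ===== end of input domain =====

-- B replaces A's per-category loop with membership scans by one flat code→category dict and a single lookup (idiomatic).

-- ===== PORT A =====
-- the `categories` dict literal of A, as an insertion-ordered association of category to code list
def pvCategories : List (String × List String) :=
  [("financial", ["PVP", "CUIP", "CFD", "SE", "GMM", "CC", "CTI", "IIF"]),
   ("operational", ["NEPP", "MLP", "TPE", "CPPL", "CPROD", "ES", "EE"]),
   ("inventory", ["IPF", "II", "DPL", "TR", "CMIPF", "MRE", "MRA"]),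
   ("customer", ["CPD", "VPC", "PC", "NC"]),
   ("logistics", ["CUTRANS", "CTPLV", "ALC", "LG"]),
   ("quality", ["QC", "CCP"]),
   ("resources", ["HAU", "HTP", "EAT", "TTEP", "TP"]),
   ("components", ["CMP1", "V1", "CMP2", "V2", "CMP3", "V3"]),
   ("demand", ["DH"])]

-- A's `for category, vars_in_cat in categories.items(): if variable_code in vars_in_cat: return category` / `return 'other'`
def pvCatLoop (v : String) : List (String × List String) → String
  | [] => "other"
  | (c, xs) :: rest => if xs.contains v then c else pvCatLoop v rest

def get_variable_category_py (variable_code : String) : String :=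
  pvCatLoop variable_code pvCategories

-- ===== PORT B =====
-- Source B's module-level dict literal _CATEGORY_BY_CODE (all keys distinct, so the literal dict is exactly this items list)
def pvCategoryByCode : PySem.Dict String String := PySem.Dict.mk
  [("PVP", "financial"), ("CUIP", "financial"), ("CFD", "financial"), ("SE", "financial"),
   ("GMM", "financial"), ("CC", "financial"), ("CTI", "financial"), ("IIF", "financial"),
   ("NEPP", "operational"), ("MLP", "operational"), ("TPE", "operational"), ("CPPL", "operational"),
   ("CPROD", "operational"), ("ES", "operational"), ("EE", "operational"),
   ("IPF", "inventory"), ("II", "inventory"), ("DPL", "inventory"), ("TR", "inventory"),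
   ("CMIPF", "inventory"), ("MRE", "inventory"), ("MRA", "inventory"),
   ("CPD", "customer"), ("VPC", "customer"), ("PC", "customer"), ("NC", "customer"),
   ("CUTRANS", "logistics"), ("CTPLV", "logistics"), ("ALC", "logistics"), ("LG", "logistics"),
   ("QC", "quality"), ("CCP", "quality"),
   ("HAU", "resources"), ("HTP", "resources"), ("EAT", "resources"), ("TTEP", "resources"), ("TP", "resources"),
   ("CMP1", "components"), ("V1", "components"), ("CMP2", "components"), ("V2", "components"),
   ("CMP3", "components"), ("V3", "components"),
   ("DH", "demand")]

-- Source B: `return _CATEGORY_BY_CODE.get(variable_code, 'other')`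
def get_variable_category_py_alt (variable_code : String) : String :=
  pvCategoryByCode.getD variable_code "other"

-- ===== PRECONDITION & SPEC =====
def Spec_get_variable_category_py (variable_code : String) (out : String) : Prop := out = get_variable_category_py_alt variable_code
instance (variable_code : String) (out : String) : Decidable (Spec_get_variable_category_py variable_code out) := by unfold Spec_get_variable_category_py; infer_instance

-- ===== CLAIM (what is proved, stated in full; the proofs are below) =====
def Claim_equal_get_variable_category_py : Prop := ∀ (variable_code : String), Dom_get_variable_category_py variable_code → Spec_get_variable_category_py variable_code (get_variable_category_py variable_code)

-- ===== LEMMAS AND PROOFS =====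

-- first-match lookup in a block of pairs (x, c) for x ∈ xs is the membership test `v ∈ xs`
lemma pv_get?_mk_map_append (v c : String) (xs : List String) (rest : List (String × String)) :
    (PySem.Dict.mk (xs.map (fun x => (x, c)) ++ rest)).get? v
      = if xs.contains v then some c else (PySem.Dict.mk rest).get? v := by
  induction xs with
  | nil => simp
  | cons x xs ih =>
    simp only [List.map_cons, List.cons_append, PySem.Dict.get?_mk_cons, ih, List.contains_cons]
    by_cases h : x = v
    · subst h; simp
    · simp [h, Ne.symm h, beq_iff_eq]

-- A's early-return category loop equals one lookup in the flattened (code, category) association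
lemma pv_catLoop_eq_lookup (v : String) (cats : List (String × List String)) :
    pvCatLoop v cats
      = (PySem.Dict.mk (cats.flatMap fun p => p.2.map fun x => (x, p.1))).getD v "other" := by
  induction cats with
  | nil => simp [pvCatLoop, PySem.Dict.getD_eq_get?_getD, PySem.Dict.get?]
  | cons p rest ih =>
    obtain ⟨c, xs⟩ := p
    simp only [pvCatLoop, List.flatMap_cons, PySem.Dict.getD_eq_get?_getD,
      pv_get?_mk_map_append] at *
    by_cases h : v ∈ xs <;> simp [h, ih]

-- ===== VERDICT (by name: the statement is the Claim_ definition above) =====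
theorem get_variable_category_py_spec : Claim_equal_get_variable_category_py := by
  intro v _
  show _ = _
  rw [get_variable_category_py, pv_catLoop_eq_lookup]
  rfl
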